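-- pv_equiv track=rewrite | github.com/mattthewb5/OfferingMemorandum | multi-county-real-estate-research/core/demographics_calculator.py | _aggregate_income_distribution
-- ===== SOURCE A (Python) =====
-- from typing import Dict, List, Optional, Any, Tuple
--
-- def _aggregate_income_distribution(block_groups: List[Dict]) -> Dict[str, int]:
--     """Aggregate income distribution across block groups."""
--     brackets = {
--         'Under $25K': sum(
--             (bg.get('income_under_10k') or 0) +
--             (bg.get('income_10k_15k') or 0) +
--             (bg.get('income_15k_20k') or 0) +
--             (bg.get('income_20k_25k') or 0)
--             for bg in block_groups
--         ),
--         '$25K-$50K': sum(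
--             (bg.get('income_25k_30k') or 0) +
--             (bg.get('income_30k_35k') or 0) +
--             (bg.get('income_35k_40k') or 0) +
--             (bg.get('income_40k_45k') or 0) +
--             (bg.get('income_45k_50k') or 0)
--             for bg in block_groups
--         ),
--         '$50K-$75K': sum(
--             (bg.get('income_50k_60k') or 0) +
--             (bg.get('income_60k_75k') or 0)
--             for bg in block_groups
--         ),
--         '$75K-$100K': sum(
--             (bg.get('income_75k_100k') or 0)
--             for bg in block_groups
--         ),
--         '$100K-$150K': sum(
--             (bg.get('income_100k_125k') or 0) +
--             (bg.get('income_125k_150k') or 0)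
--             for bg in block_groups
--         ),
--         '$150K-$200K': sum(
--             (bg.get('income_150k_200k') or 0)
--             for bg in block_groups
--         ),
--         '$200K+': sum(
--             (bg.get('income_200k_plus') or 0)
--             for bg in block_groups
--         )
--     }
--     return brackets
-- ===== SOURCE B (Python) =====
-- _TABLE = [
--     ('Under $25K', ['income_under_10k', 'income_10k_15k', 'income_15k_20k', 'income_20k_25k']),
--     ('$25K-$50K', ['income_25k_30k', 'income_30k_35k', 'income_35k_40k', 'income_40k_45k', 'income_45k_50k']),
--     ('$50K-$75K', ['income_50k_60k', 'income_60k_75k']),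
--     ('$75K-$100K', ['income_75k_100k']),
--     ('$100K-$150K', ['income_100k_125k', 'income_125k_150k']),
--     ('$150K-$200K', ['income_150k_200k']),
--     ('$200K+', ['income_200k_plus']),
-- ]
--
-- def _aggregate_income_distribution(block_groups):
--     """Aggregate income distribution across block groups in a single pass."""
--     totals = [0] * len(_TABLE)
--     for bg in block_groups:
--         totals = [t + sum(bg.get(k) or 0 for k in keys)
--                   for t, (_, keys) in zip(totals, _TABLE)]
--     return {label: t for (label, _), t in zip(_TABLE, totals)}
-- ===== Notes on version B (the rewrite author's own statement) =====
-- stated objective: alternative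
-- what changed: A makes seven independent generator-sum passes over block_groups (one per bracket); B drives everything from a bracket->keys table and makes a single pass over block_groups, maintaining a vector of seven running totals updated per block group.
import Mathlib
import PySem

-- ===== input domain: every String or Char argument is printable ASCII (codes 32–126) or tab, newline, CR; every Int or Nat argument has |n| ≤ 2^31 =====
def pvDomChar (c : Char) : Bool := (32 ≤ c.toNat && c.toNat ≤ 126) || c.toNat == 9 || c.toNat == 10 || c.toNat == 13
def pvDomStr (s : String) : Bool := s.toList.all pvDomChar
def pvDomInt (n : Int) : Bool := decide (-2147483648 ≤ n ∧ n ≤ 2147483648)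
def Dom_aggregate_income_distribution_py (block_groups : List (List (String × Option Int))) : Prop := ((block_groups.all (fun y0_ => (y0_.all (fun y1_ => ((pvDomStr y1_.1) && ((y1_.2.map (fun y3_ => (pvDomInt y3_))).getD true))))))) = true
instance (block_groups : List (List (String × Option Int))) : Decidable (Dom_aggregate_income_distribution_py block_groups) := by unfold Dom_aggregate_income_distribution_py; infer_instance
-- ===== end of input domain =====

-- ===== PORT A =====
-- B changes only the decomposition: a table-driven single pass instead of seven passes (alternative, not faster).
-- helper shared by both ports: Python's '(bg.get(k) or 0)' on a dict[str, Optional[int]]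
def pyGetOr0 (bg : List (String × Option Int)) (k : String) : Int :=
  match (PySem.Dict.mk bg).get? k with
  | some (some v) => if v == 0 then 0 else v
  | _ => 0

def aggregate_income_distribution_py (block_groups : List (List (String × Option Int))) : List (String × Int) :=
  [ ("Under $25K",
      (block_groups.map (fun bg =>
        pyGetOr0 bg "income_under_10k" + pyGetOr0 bg "income_10k_15k" +
        pyGetOr0 bg "income_15k_20k" + pyGetOr0 bg "income_20k_25k")).sum),
    ("$25K-$50K",
      (block_groups.map (fun bg =>
        pyGetOr0 bg "income_25k_30k" + pyGetOr0 bg "income_30k_35k" +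
        pyGetOr0 bg "income_35k_40k" + pyGetOr0 bg "income_40k_45k" +
        pyGetOr0 bg "income_45k_50k")).sum),
    ("$50K-$75K",
      (block_groups.map (fun bg =>
        pyGetOr0 bg "income_50k_60k" + pyGetOr0 bg "income_60k_75k")).sum),
    ("$75K-$100K",
      (block_groups.map (fun bg => pyGetOr0 bg "income_75k_100k")).sum),
    ("$100K-$150K",
      (block_groups.map (fun bg =>
        pyGetOr0 bg "income_100k_125k" + pyGetOr0 bg "income_125k_150k")).sum),
    ("$150K-$200K",
      (block_groups.map (fun bg => pyGetOr0 bg "income_150k_200k")).sum),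
    ("$200K+",
      (block_groups.map (fun bg => pyGetOr0 bg "income_200k_plus")).sum) ]

-- ===== PORT B =====
def pvTable : List (String × List String) :=
  [ ("Under $25K", ["income_under_10k", "income_10k_15k", "income_15k_20k", "income_20k_25k"]),
    ("$25K-$50K", ["income_25k_30k", "income_30k_35k", "income_35k_40k", "income_40k_45k", "income_45k_50k"]),
    ("$50K-$75K", ["income_50k_60k", "income_60k_75k"]),
    ("$75K-$100K", ["income_75k_100k"]),
    ("$100K-$150K", ["income_100k_125k", "income_125k_150k"]),
    ("$150K-$200K", ["income_150k_200k"]),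
    ("$200K+", ["income_200k_plus"]) ]

def aggregate_income_distribution_py_alt (block_groups : List (List (String × Option Int))) : List (String × Int) :=
  let totals := block_groups.foldl
    (fun totals bg =>
      List.zipWith (fun t lk => t + (lk.2.map (fun k => pyGetOr0 bg k)).sum) totals pvTable)
    (List.replicate pvTable.length 0)
  List.zipWith (fun lk t => (lk.1, t)) pvTable totals

-- ===== PRECONDITION & SPEC =====
def Spec_aggregate_income_distribution_py (block_groups : List (List (String × Option Int))) (out : List (String × Int)) : Prop := out = aggregate_income_distribution_py_alt block_groups
instance (block_groups : List (List (String × Option Int))) (out : List (String × Int)) : Decidable (Spec_aggregate_income_distribution_py block_groups out) := by unfold Spec_aggregate_income_distribution_py; infer_instance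

-- ===== CLAIM (what is proved, stated in full; the proofs are below) =====
def Claim_equal_aggregate_income_distribution_py : Prop := ∀ (block_groups : List (List (String × Option Int))), Dom_aggregate_income_distribution_py block_groups → Spec_aggregate_income_distribution_py block_groups (aggregate_income_distribution_py block_groups)

-- ===== LEMMAS AND PROOFS =====
-- one step of B's fold applied to a literal 7-vector of totals (proof-only helper)
lemma pv_step (bg : List (String × Option Int)) (a1 a2 a3 a4 a5 a6 a7 : Int) :
    List.zipWith (fun t lk => t + (lk.2.map (fun k => pyGetOr0 bg k)).sum)
      [a1, a2, a3, a4, a5, a6, a7] pvTable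
    = [a1 + (pyGetOr0 bg "income_under_10k" + pyGetOr0 bg "income_10k_15k" +
             pyGetOr0 bg "income_15k_20k" + pyGetOr0 bg "income_20k_25k"),
       a2 + (pyGetOr0 bg "income_25k_30k" + pyGetOr0 bg "income_30k_35k" +
             pyGetOr0 bg "income_35k_40k" + pyGetOr0 bg "income_40k_45k" +
             pyGetOr0 bg "income_45k_50k"),
       a3 + (pyGetOr0 bg "income_50k_60k" + pyGetOr0 bg "income_60k_75k"),
       a4 + pyGetOr0 bg "income_75k_100k",
       a5 + (pyGetOr0 bg "income_100k_125k" + pyGetOr0 bg "income_125k_150k"),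
       a6 + pyGetOr0 bg "income_150k_200k",
       a7 + pyGetOr0 bg "income_200k_plus"] := by
  simp [pvTable]
  and_intros <;> ring

lemma pv_fold7 (bgs : List (List (String × Option Int))) (a1 a2 a3 a4 a5 a6 a7 : Int) :
    bgs.foldl
      (fun totals bg =>
        List.zipWith (fun t lk => t + (lk.2.map (fun k => pyGetOr0 bg k)).sum) totals pvTable)
      [a1, a2, a3, a4, a5, a6, a7]
    = [a1 + (bgs.map (fun bg =>
               pyGetOr0 bg "income_under_10k" + pyGetOr0 bg "income_10k_15k" +
               pyGetOr0 bg "income_15k_20k" + pyGetOr0 bg "income_20k_25k")).sum,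
       a2 + (bgs.map (fun bg =>
               pyGetOr0 bg "income_25k_30k" + pyGetOr0 bg "income_30k_35k" +
               pyGetOr0 bg "income_35k_40k" + pyGetOr0 bg "income_40k_45k" +
               pyGetOr0 bg "income_45k_50k")).sum,
       a3 + (bgs.map (fun bg =>
               pyGetOr0 bg "income_50k_60k" + pyGetOr0 bg "income_60k_75k")).sum,
       a4 + (bgs.map (fun bg => pyGetOr0 bg "income_75k_100k")).sum,
       a5 + (bgs.map (fun bg =>
               pyGetOr0 bg "income_100k_125k" + pyGetOr0 bg "income_125k_150k")).sum,
       a6 + (bgs.map (fun bg => pyGetOr0 bg "income_150k_200k")).sum,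
       a7 + (bgs.map (fun bg => pyGetOr0 bg "income_200k_plus")).sum] := by
  induction bgs generalizing a1 a2 a3 a4 a5 a6 a7 with
  | nil => simp
  | cons bg rest ih =>
    rw [List.foldl_cons, pv_step, ih]
    simp only [List.map_cons, List.sum_cons, List.cons.injEq, and_true]
    refine ⟨by ring, by ring, by ring, by ring, by ring, by ring, by ring⟩

-- ===== VERDICT (by name: the statement is the Claim_ definition above) =====
theorem aggregate_income_distribution_py_spec : Claim_equal_aggregate_income_distribution_py := by
  intro bgs _
  unfold Spec_aggregate_income_distribution_py aggregate_income_distribution_py aggregate_income_distribution_py_alt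
  rw [show (List.replicate pvTable.length (0:Int)) = [0,0,0,0,0,0,0] from by simp [pvTable]]
  rw [pv_fold7]
  simp [pvTable]
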